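-- pv_equiv track=rewrite | github.com/HemadarshiniS220801079/QUESTIONS | transform_numbers.py | transform_numbers
-- ===== SOURCE A (Python) =====
-- def transform_numbers(numbers):
--     result = []
--
--     for num in numbers:
--         if num % 2 == 0:
--             result.append(num ** 2)
--         else:
--             result.append(num ** 3)
--
--     return result
-- ===== SOURCE B (Python) =====
-- def transform_numbers(numbers):
--     result = [n * n for n in numbers]
--     for i, n in enumerate(numbers):
--         if n % 2:
--             result[i] *= n
--     return result
-- ===== Notes on version B (the rewrite author's own statement) =====
-- stated objective: alternative
-- what changed: Two staged passes instead of one branching loop: first build the list of squares of all numbers, then a second pass mutates in place, multiplying the entries at odd numbers by the number once more (square -> cube), with no append and no even/odd branch choosing between two powers.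
import Mathlib
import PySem

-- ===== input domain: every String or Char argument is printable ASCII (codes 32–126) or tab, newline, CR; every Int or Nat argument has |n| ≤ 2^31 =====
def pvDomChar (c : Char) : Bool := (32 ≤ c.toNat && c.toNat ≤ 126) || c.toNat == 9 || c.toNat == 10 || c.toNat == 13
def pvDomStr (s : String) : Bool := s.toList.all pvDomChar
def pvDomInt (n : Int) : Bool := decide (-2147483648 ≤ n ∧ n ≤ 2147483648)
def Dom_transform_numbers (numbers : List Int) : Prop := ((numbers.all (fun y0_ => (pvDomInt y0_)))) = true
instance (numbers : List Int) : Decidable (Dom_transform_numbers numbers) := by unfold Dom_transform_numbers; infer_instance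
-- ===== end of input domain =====

-- B restructures A's single branching append-loop into two staged passes: square everything, then
-- multiply the entries at odd numbers by the number once more (alternative decomposition, same cost).

-- ===== PORT A =====
-- literal port: loop over numbers, appending num**2 or num**3 to the accumulator
def transform_numbers (numbers : List Int) : List Int :=
  numbers.foldl (fun result num =>
    if PySem.Int.mod num 2 = 0 then result ++ [num ^ 2] else result ++ [num ^ 3]) []

-- ===== PORT B =====
-- pass 1: squares of all numbers; pass 2: in-place result[i] *= n at odd n.
-- enumerate indices are ≥ 0 here, so .toNat is exact for Python's result[i].
def transform_numbers_alt (numbers : List Int) : List Int :=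
  let result := numbers.map (fun n => n * n)
  (PySem.List.enumerate numbers).foldl
    (fun res p =>
      if PySem.Int.mod p.2 2 ≠ 0 then res.set p.1.toNat (res.getD p.1.toNat 0 * p.2) else res)
    result

-- ===== PRECONDITION & SPEC =====
def Spec_transform_numbers (numbers : List Int) (out : List Int) : Prop := out = transform_numbers_alt numbers
instance (numbers : List Int) (out : List Int) : Decidable (Spec_transform_numbers numbers out) := by unfold Spec_transform_numbers; infer_instance

-- ===== CLAIM (what is proved, stated in full; the proofs are below) =====
def Claim_equal_transform_numbers : Prop := ∀ (numbers : List Int), Dom_transform_numbers numbers → Spec_transform_numbers numbers (transform_numbers numbers)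

-- ===== LEMMAS AND PROOFS =====
-- the common reference value: square evens, cube odds
def pvF (n : Int) : Int := if PySem.Int.mod n 2 = 0 then n ^ 2 else n ^ 3

theorem pv_set_append (pre : List Int) (a : Int) (rest : List Int) (v : Int) :
    (pre ++ a :: rest).set pre.length v = pre ++ v :: rest := by
  induction pre with
  | nil => rfl
  | cons x xs ih => simp [ih]

theorem pv_getD_append (pre : List Int) (a : Int) (rest : List Int) :
    (pre ++ a :: rest).getD pre.length 0 = a := by
  induction pre with
  | nil => rfl
  | cons x xs _ => simp

theorem pv_a_fold (numbers : List Int) (acc : List Int) :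
    numbers.foldl (fun result num =>
      if PySem.Int.mod num 2 = 0 then result ++ [num ^ 2] else result ++ [num ^ 3]) acc
    = acc ++ numbers.map pvF := by
  induction numbers generalizing acc with
  | nil => simp
  | cons x xs ih =>
    simp only [List.foldl_cons, List.map_cons]
    have h1 : (if PySem.Int.mod x 2 = 0 then acc ++ [x ^ 2] else acc ++ [x ^ 3])
        = acc ++ [pvF x] := by unfold pvF; split <;> rfl
    rw [h1, ih, List.append_assoc]; rfl

theorem pv_b_fold (xs : List Int) (pre : List Int) :
    (PySem.List.enumerate xs (pre.length : Int)).foldl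
      (fun res p =>
        if PySem.Int.mod p.2 2 ≠ 0 then res.set p.1.toNat (res.getD p.1.toNat 0 * p.2) else res)
      (pre ++ xs.map (fun n => n * n))
    = pre ++ xs.map pvF := by
  induction xs generalizing pre with
  | nil => simp
  | cons x xs ih =>
    rw [PySem.List.enumerate_cons]
    simp only [List.foldl_cons, List.map_cons]
    have hstep : (if PySem.Int.mod x 2 ≠ 0 then
        (pre ++ x * x :: xs.map (fun n => n * n)).set ((pre.length : Int)).toNat
          ((pre ++ x * x :: xs.map (fun n => n * n)).getD ((pre.length : Int)).toNat 0 * x)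
        else pre ++ x * x :: xs.map (fun n => n * n))
        = pre ++ pvF x :: xs.map (fun n => n * n) := by
      have htn : ((pre.length : Int)).toNat = pre.length := Int.toNat_natCast _
      rw [htn, pv_getD_append, pv_set_append]
      rcases PySem.Int.mod_two_eq x with h | h
      · rw [if_neg (by rw [h]; simp)]
        unfold pvF; rw [if_pos h]
        have hx : x * x = x ^ 2 := by ring
        rw [hx]
      · rw [if_pos (by rw [h]; simp)]
        unfold pvF; rw [if_neg (by rw [h]; simp)]
        have hx : x * x * x = x ^ 3 := by ring
        rw [hx]
    rw [hstep]
    have hlen : ((pre.length : Int) + 1) = (((pre ++ [pvF x]).length : Nat) : Int) := by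
      simp
    have := ih (pre ++ [pvF x])
    rw [hlen]
    simpa [List.append_assoc] using this

-- ===== VERDICT (by name: the statement is the Claim_ definition above) =====
theorem transform_numbers_spec : Claim_equal_transform_numbers := by
  intro numbers _
  unfold Spec_transform_numbers transform_numbers transform_numbers_alt
  rw [pv_a_fold]
  have := pv_b_fold numbers []
  simpa using this.symm
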